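-- pv_equiv track=rewrite | github.com/alfariiizi/Stroke-App | src/app.py | convert_list_to_dummy
-- ===== SOURCE A (Python) =====
-- def convert_list_to_dummy( s: str, l: list ):
--     result = [0] * len(l)
--     i_found = None
--     for i in range(len(result)):
--         if l[i] == s:
--             i_found = i
--     if i_found != None:
--         result[i_found] = 1
--     return result
-- ===== SOURCE B (Python) =====
-- def convert_list_to_dummy(s: str, l: list):
--     out = []
--     found = False
--     for x in reversed(l):
--         if not found and x == s:
--             out.append(1)
--             found = True
--         else:
--             out.append(0)
--     out.reverse()
--     return out
-- ===== Notes on version B (the rewrite author's own statement) =====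
-- stated objective: alternative
-- what changed: Instead of allocating [0]*len(l) and overwriting the cell at a tracked last-match index after a forward scan, B builds the vector element-by-element walking the list back-to-front with a found flag (the first match from the right emits 1, everything else 0) and reverses it; no index arithmetic or in-place assignment at all.
import Mathlib
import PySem

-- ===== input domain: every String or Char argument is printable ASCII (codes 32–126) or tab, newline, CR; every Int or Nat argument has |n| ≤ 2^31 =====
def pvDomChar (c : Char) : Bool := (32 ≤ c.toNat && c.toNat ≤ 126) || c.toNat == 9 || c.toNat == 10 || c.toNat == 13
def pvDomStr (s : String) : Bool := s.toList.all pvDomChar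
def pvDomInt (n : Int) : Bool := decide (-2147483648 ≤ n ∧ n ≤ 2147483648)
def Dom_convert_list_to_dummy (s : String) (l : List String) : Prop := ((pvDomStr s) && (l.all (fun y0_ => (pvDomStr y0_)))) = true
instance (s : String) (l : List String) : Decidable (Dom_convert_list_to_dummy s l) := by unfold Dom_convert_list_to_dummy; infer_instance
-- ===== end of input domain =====

-- B builds the one-hot vector element-by-element walking the list back-to-front with a
-- found flag (first match from the right emits 1, everything else 0), then reverses —
-- no preallocated [0]*n, no index tracking, no in-place assignment; objective: alternative.

-- ===== PORT A =====
-- forward loop over range(len(result)), tracking the last index where l[i] == s,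
-- then setting that cell of the preallocated zero row.
-- (l.getD i "" is exact here: every i produced by the range is < l.length)
def convert_list_to_dummy (s : String) (l : List String) : List Int :=
  let result : List Int := List.replicate l.length 0
  let i_found : Option Nat :=
    List.foldl (fun acc i => if l.getD i "" = s then some i else acc) none (List.range l.length)
  match i_found with
  | some i => result.set i 1
  | none => result

-- ===== PORT B =====
-- loop body of B: append 1 on the first match (setting found), else append 0
def pvStepB (s : String) (acc : List Int × Bool) (x : String) : List Int × Bool :=
  if !acc.2 && x == s then (acc.1 ++ [(1 : Int)], true) else (acc.1 ++ [(0 : Int)], acc.2)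

-- for x in reversed(l): pvStepB; then out.reverse()
def convert_list_to_dummy_alt (s : String) (l : List String) : List Int :=
  (List.foldl (pvStepB s) ([], false) l.reverse).1.reverse

-- ===== PRECONDITION & SPEC =====
def Spec_convert_list_to_dummy (s : String) (l : List String) (out : List Int) : Prop := out = convert_list_to_dummy_alt s l
instance (s : String) (l : List String) (out : List Int) : Decidable (Spec_convert_list_to_dummy s l out) := by unfold Spec_convert_list_to_dummy; infer_instance

-- ===== CLAIM (what is proved, stated in full; the proofs are below) =====
def Claim_equal_convert_list_to_dummy : Prop := ∀ (s : String) (l : List String), Dom_convert_list_to_dummy s l → Spec_convert_list_to_dummy s l (convert_list_to_dummy s l)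

-- ===== LEMMAS AND PROOFS =====

-- once found, B only appends zeros
theorem foldB_found (s : String) (ys : List String) (acc : List Int) :
    List.foldl (pvStepB s) (acc, true) ys = (acc ++ List.replicate ys.length 0, true) := by
  induction ys generalizing acc with
  | nil => simp
  | cons y ys ih =>
      rw [List.foldl_cons,
        show pvStepB s (acc, true) y = (acc ++ [(0 : Int)], true) from by simp [pvStepB], ih]
      simp [List.replicate_succ]

-- the starting accumulator is only ever a prefix of the final output
theorem foldB_prefix (s : String) (ys : List String) (acc : List Int) (b : Bool) :
    List.foldl (pvStepB s) (acc, b) ys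
      = (acc ++ (List.foldl (pvStepB s) ([], b) ys).1, (List.foldl (pvStepB s) ([], b) ys).2) := by
  induction ys generalizing acc b with
  | nil => simp
  | cons y ys ih =>
      simp only [List.foldl_cons, pvStepB, List.nil_append]
      by_cases h : (!b && y == s) = true
      · simp only [if_pos h]
        rw [ih, ih [(1 : Int)]]
        simp
      · simp only [if_neg h]
        rw [ih, ih [(0 : Int)]]
        simp

-- A's tracker only ever returns an index it saw
theorem trackA_mem (s : String) (l : List String) (ys : List Nat) (a : Option Nat) (i : Nat)
    (h : List.foldl (fun acc i => if l.getD i "" = s then some i else acc) a ys = some i) :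
    i ∈ ys ∨ a = some i := by
  induction ys generalizing a with
  | nil => exact Or.inr h
  | cons y ys ih =>
      simp only [List.foldl_cons] at h
      rcases ih _ h with h' | h'
      · exact Or.inl (List.mem_cons_of_mem _ h')
      · by_cases hy : l.getD y "" = s
        · rw [if_pos hy] at h'
          exact Or.inl (by simp [← Option.some_inj.mp h'])
        · rw [if_neg hy] at h'
          exact Or.inr h'

-- the core equality, by induction from the right
theorem AB_eq (s : String) (l : List String) :
    convert_list_to_dummy s l = convert_list_to_dummy_alt s l := by
  induction l using List.reverseRecOn with
  | nil => rfl
  | append_singleton xs x ih =>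
      unfold convert_list_to_dummy convert_list_to_dummy_alt at *
      simp only [List.length_append, List.length_cons, List.length_nil] at *
      have hcongr :
          List.foldl (fun acc i => if (xs ++ [x]).getD i "" = s then some i else acc)
              (none : Option Nat) (List.range xs.length)
            = List.foldl (fun acc i => if xs.getD i "" = s then some i else acc)
              (none : Option Nat) (List.range xs.length) := by
        refine PySem.List.foldl_congr_mem _ _ _ _ ?_
        intro acc i hi
        have hlt : i < xs.length := List.mem_range.mp hi
        have : (xs ++ [x]).getD i "" = xs.getD i "" := by
          simp [List.getD, List.getElem?_append_left hlt]
        rw [this]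
      have hget : (xs ++ [x]).getD xs.length "" = x := by simp [List.getD]
      have hrev : (xs ++ [x]).reverse = x :: xs.reverse := by simp
      rw [List.range_succ, List.foldl_append, hcongr, hrev]
      simp only [List.foldl_cons, List.foldl_nil, hget]
      by_cases hx : x = s
      · -- last element matches: A sets the final cell; B emits 1 first then only zeros
        rw [if_pos hx,
          show pvStepB s (([] : List Int), false) x = ([(1 : Int)], true) from by
            simp [pvStepB, hx],
          foldB_found s xs.reverse [(1 : Int)]]
        simp [List.replicate_succ']
      · -- last element differs: both sides append a trailing 0 to the answer for xs
        rw [if_neg hx,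
          show pvStepB s (([] : List Int), false) x = ([(0 : Int)], false) from by
            simp [pvStepB, hx],
          foldB_prefix s xs.reverse [(0 : Int)] false]
        simp only [List.singleton_append, List.reverse_cons]
        rw [← ih]
        cases htr : List.foldl (fun acc i => if xs.getD i "" = s then some i else acc)
            (none : Option Nat) (List.range xs.length) with
        | none => simp [List.replicate_succ']
        | some i =>
            have hi : i < xs.length := by
              rcases trackA_mem s xs (List.range xs.length) none i htr with h | h
              · exact List.mem_range.mp h
              · cases h
            simp only [List.replicate_succ', List.set_append]
            rw [if_pos (by simpa using hi)]

-- ===== VERDICT (by name: the statement is the Claim_ definition above) =====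
theorem convert_list_to_dummy_spec : Claim_equal_convert_list_to_dummy := by
  intro s l _
  exact AB_eq s l
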